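-- pv_equiv track=rewrite | github.com/moisesbaqueta/PLC-TP | ex2/plc23TP1gr10.py | modalidade_total
-- ===== SOURCE A (Python) =====
-- def modalidade_total(dados):
--
--     dict_total = {}
--     # Iterar os dados
--     for dado in dados:
--
--         modalidade = dado["modalidade"]
--         # Verificar a string é vazia
--         if modalidade:
--             # Se a modalidade não for uma chave do dicionário, adiciona como chave
--             if modalidade not in dict_total.keys():
--                 dict_total[modalidade] = 1
--             else:
--             # Caso a modalidade já exista como chave, incremeta o valor
--                 dict_total[dado["modalidade"]] += 1
--
--     #Ordenar as modalidades por ordem alfabética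
--     dict_total = dict(sorted(dict_total.items()))
--
--     return dict_total
-- ===== SOURCE B (Python) =====
-- def modalidade_total(dados):
--     # sort the non-empty modalidades once, then count runs in one pass
--     ms = sorted(d["modalidade"] for d in dados if d["modalidade"])
--     res = {}
--     i, n = 0, len(ms)
--     while i < n:
--         j = i + 1
--         while j < n and ms[j] == ms[i]:
--             j += 1
--         res[ms[i]] = j - i
--         i = j
--     return res
-- ===== Notes on version B (the rewrite author's own statement) =====
-- stated objective: alternative
-- what changed: A counts into a dict with a membership test per row and sorts the items afterwards; B collects the non-empty modalidade strings, sorts that list once, and produces the alphabetically ordered counts by a single run-length scan over the sorted list.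
import Mathlib
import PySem

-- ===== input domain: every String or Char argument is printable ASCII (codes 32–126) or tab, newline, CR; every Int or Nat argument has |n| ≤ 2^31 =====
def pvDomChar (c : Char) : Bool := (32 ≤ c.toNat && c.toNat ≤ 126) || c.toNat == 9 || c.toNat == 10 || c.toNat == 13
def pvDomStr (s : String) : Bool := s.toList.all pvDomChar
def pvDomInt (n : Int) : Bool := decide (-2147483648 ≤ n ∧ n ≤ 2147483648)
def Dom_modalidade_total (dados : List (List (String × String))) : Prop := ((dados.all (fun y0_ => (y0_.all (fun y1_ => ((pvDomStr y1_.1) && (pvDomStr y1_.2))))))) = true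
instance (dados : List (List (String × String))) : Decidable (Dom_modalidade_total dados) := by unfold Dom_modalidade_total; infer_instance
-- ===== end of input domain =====

-- B sorts the non-empty modalidade list once and counts runs in one scan, instead of A's
-- dict-counting followed by sorting the items; equivalence is proved on inputs whose rows
-- all carry the "modalidade" key (A raises KeyError otherwise).


-- dado["modalidade"]: first-match lookup in the row's association list (shared by both ports)
def pvLookup (dado : List (String × String)) : Option String :=
  (PySem.Dict.mk dado).get? "modalidade"

-- ===== PORT A =====
-- the body of A's for loop
def pvStepA (dt : PySem.Dict String Int) (dado : List (String × String)) : PySem.Dict String Int :=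
  match pvLookup dado with
  | none => dt            -- KeyError in Python: excluded by Pre_
  | some modalidade =>
    if modalidade ≠ "" then
      if dt.contains modalidade = false then dt.insert modalidade 1
      else dt.insert modalidade (dt.getD modalidade 0 + 1)
    else dt

def modalidade_total (dados : List (List (String × String))) : List (String × Int) :=
  let dict_total := dados.foldl pvStepA PySem.Dict.empty
  PySem.List.sorted2 dict_total.items Prod.fst Prod.snd

-- ===== PORT B =====
-- the list comprehension: non-empty modalidades, in order
def pvMods (dados : List (List (String × String))) : List String :=
  dados.foldr (fun d acc =>
    match pvLookup d with
    | none => acc           -- KeyError in Python: excluded by Pre_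
    | some m => if m ≠ "" then m :: acc else acc) []

-- the while loop over the sorted list: one (value, run length) pair per run
def pvRuns : List String → List (String × Int)
  | [] => []
  | x :: t =>
      (x, 1 + ((t.takeWhile (fun y => y == x)).length : Int)) ::
        pvRuns (t.dropWhile (fun y => y == x))
  termination_by l => l.length
  decreasing_by
    simp only [List.length_cons]
    exact Nat.lt_succ_of_le (List.length_dropWhile_le _ _)

def modalidade_total_alt (dados : List (List (String × String))) : List (String × Int) :=
  pvRuns (PySem.List.sorted (pvMods dados) (fun x => x) false)

-- ===== PRECONDITION & SPEC =====
-- Pre_ excludes rows without the "modalidade" key, on which Python A (and B) raise KeyError.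
def Pre_modalidade_total (dados : List (List (String × String))) : Prop :=
  ∀ dado ∈ dados, "modalidade" ∈ dado.map Prod.fst
instance (dados : List (List (String × String))) : Decidable (Pre_modalidade_total dados) := by
  unfold Pre_modalidade_total; infer_instance

def pvWitness_modalidade_total : (List (List (String × String))) :=
  [[("modalidade", "futebol")], [("modalidade", "")], [("modalidade", "andebol"), ("nome", "x")]]

def Spec_modalidade_total (dados : List (List (String × String))) (out : List (String × Int)) : Prop := out = modalidade_total_alt dados
instance (dados : List (List (String × String))) (out : List (String × Int)) : Decidable (Spec_modalidade_total dados out) := by unfold Spec_modalidade_total; infer_instance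

-- ===== CLAIM (what is proved, stated in full; the proofs are below) =====
def Claim_equal_modalidade_total : Prop := ∀ (dados : List (List (String × String))), Dom_modalidade_total dados → Pre_modalidade_total dados → Spec_modalidade_total dados (modalidade_total dados)

-- ===== LEMMAS AND PROOFS =====

-- A's two insert branches are one insert
theorem pv_step_eq (dt : PySem.Dict String Int) (m : String) :
    (if dt.contains m = false then dt.insert m 1
     else dt.insert m (dt.getD m 0 + 1)) = dt.insert m (dt.getD m 0 + 1) := by
  by_cases h : dt.contains m = false
  · rw [if_pos h, PySem.Dict.getD_of_not_contains dt 0 h]; norm_num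
  · rw [if_neg h]

-- A's loop over dados is the counting loop over the filtered modalidade list
theorem pv_foldl_mods (dados : List (List (String × String))) (acc : PySem.Dict String Int) :
    dados.foldl pvStepA acc
    = (pvMods dados).foldl (fun d x => d.insert x (d.getD x 0 + 1)) acc := by
  induction dados generalizing acc with
  | nil => rfl
  | cons d rest ih =>
      simp only [List.foldl_cons]
      cases h : pvLookup d with
      | none =>
          rw [show pvMods (d :: rest) = pvMods rest by simp [pvMods, List.foldr_cons, h]]
          rw [show pvStepA acc d = acc by simp [pvStepA, h]]
          exact ih acc
      | some m =>
          by_cases hm : m = ""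
          · rw [show pvMods (d :: rest) = pvMods rest by simp [pvMods, List.foldr_cons, h, hm]]
            rw [show pvStepA acc d = acc by simp [pvStepA, h, hm]]
            exact ih acc
          · rw [show pvMods (d :: rest) = m :: pvMods rest by simp [pvMods, List.foldr_cons, h, hm]]
            rw [show pvStepA acc d = acc.insert m (acc.getD m 0 + 1) by
              simp [pvStepA, h, hm, pv_step_eq]]
            rw [List.foldl_cons]
            exact ih (acc.insert m (acc.getD m 0 + 1))

-- sorted2 of key-tagged pairs is the sorted key list, tagged
theorem pv_insertBy_map (g : String → Int) (x : String) (K : List String) :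
    PySem.List.insertBy
        (fun a b => decide (a.1 < b.1) || (!decide (b.1 < a.1) && decide (a.2 < b.2)))
        ((fun k => (k, g k)) x) (K.map (fun k => (k, g k)))
    = (PySem.List.insertBy (fun a b => decide (a < b)) x K).map (fun k => (k, g k)) := by
  induction K with
  | nil => rfl
  | cons y ys ih =>
      simp only [List.map_cons, PySem.List.insertBy]
      have hb : (decide (x < y) || (!decide (y < x) && decide (g x < g y))) = decide (x < y) := by
        rcases lt_trichotomy x y with h | h | h
        · simp [h, not_lt_of_gt h]
        · subst h; simp
        · simp [h, not_lt_of_gt h]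
      rw [hb]
      by_cases h : x < y
      · rw [if_pos (by simp [h]), if_pos (by simp [h])]
        rfl
      · rw [if_neg (by simp [h]), if_neg (by simp [h])]
        rw [List.map_cons, ih]

theorem pv_sorted2_map (g : String → Int) (K : List String) :
    PySem.List.sorted2 (K.map (fun k => (k, g k))) Prod.fst Prod.snd false
    = (PySem.List.sorted K (fun x => x) false).map (fun k => (k, g k)) := by
  simp only [PySem.List.sorted2, PySem.List.sorted, if_neg (by decide : ¬ (false = true))]
  suffices h : ∀ (acc : List String),
      (K.map (fun k => (k, g k))).foldl
        (fun acc x => PySem.List.insertBy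
          (fun a b => decide (a.1 < b.1) || (!decide (b.1 < a.1) && decide (a.2 < b.2))) x acc)
        (acc.map (fun k => (k, g k)))
      = (K.foldl (fun acc x => PySem.List.insertBy (fun a b => decide (a < b)) x acc) acc).map
          (fun k => (k, g k)) by
    simpa using h []
  induction K with
  | nil => intro acc; rfl
  | cons y ys ih =>
      intro acc
      simp only [List.map_cons, List.foldl_cons]
      rw [pv_insertBy_map, ih]

-- Set.update past a fresh head
theorem pv_update_cons (r : List String) : ∀ (s : List String) (x : String), x ∉ r →
    PySem.Set.update (x :: s) r = x :: PySem.Set.update s r := by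
  induction r with
  | nil => intro s x _; rfl
  | cons y ys ih =>
      intro s x hx
      have hyx : ¬ (y = x) := fun h => hx (h ▸ List.mem_cons_self)
      have hadd : PySem.Set.add (x :: s) y = x :: PySem.Set.add s y := by
        simp only [PySem.Set.add, PySem.Set.contains, List.contains_cons,
          show (y == x) = false from beq_false_of_ne hyx, Bool.false_or]
        split <;> rfl
      simp only [PySem.Set.update, List.foldl_cons] at *
      rw [hadd, ih _ x (fun h => hx (List.mem_cons_of_mem _ h))]

-- Set.update over a constant run is a no-op
theorem pv_update_const (w : List String) : ∀ (s : List String) (x : String), x ∈ s →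
    (∀ y ∈ w, y = x) → PySem.Set.update s w = s := by
  induction w with
  | nil => intro s x _ _; rfl
  | cons y ys ih =>
      intro s x hx hw
      have hy : y = x := hw y List.mem_cons_self
      have : PySem.Set.add s y = s := by
        simp [PySem.Set.add, PySem.Set.contains, hy, hx]
      simp only [PySem.Set.update, List.foldl_cons] at *
      rw [this]
      exact ih s x hx (fun z hz => hw z (List.mem_cons_of_mem _ hz))

-- Set.update is a sublist of s ++ l
theorem pv_update_sublist (l : List String) : ∀ (s : List String),
    (PySem.Set.update s l).Sublist (s ++ l) := by
  induction l with
  | nil => intro s; simp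
  | cons y ys ih =>
      intro s
      have h1 : (PySem.Set.update (PySem.Set.add s y) ys).Sublist (PySem.Set.add s y ++ ys) := ih _
      have h2 : (PySem.Set.add s y ++ ys).Sublist (s ++ y :: ys) := by
        by_cases h : PySem.Set.contains s y = true
        · simp only [PySem.Set.add, h, if_pos]
          exact (List.Sublist.refl s).append ((List.sublist_cons_self _ _))
        · simp only [PySem.Set.add, if_neg h]
          simp
      exact h1.trans h2

-- head of the rest of a run is not the run value
theorem pv_not_mem_dropWhile (x : String) (t : List String)
    (hge : ∀ y ∈ t, x ≤ y) (hp : t.Pairwise (· ≤ ·)) :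
    x ∉ t.dropWhile (fun y => y == x) := by
  intro hx
  cases hr : t.dropWhile (fun y => y == x) with
  | nil => rw [hr] at hx; exact absurd hx (List.not_mem_nil)
  | cons y r' =>
      have hy := List.head?_dropWhile_not (fun y => y == x) t
      rw [hr] at hy
      simp only [List.head?_cons] at hy
      have hyx : y ≠ x := by simpa using hy
      have hsub : (y :: r').Sublist t := hr ▸ List.dropWhile_sublist _
      have hxy : x ≤ y := hge y (hsub.mem List.mem_cons_self)
      rw [hr] at hx
      rcases List.mem_cons.mp hx with h | h
      · exact hyx h.symm
      · have hyr : y ≤ x := (List.rel_of_pairwise_cons (hp.sublist hsub)) h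
        exact hyx (le_antisymm hyr hxy)

-- the run-length scan of a sorted list is the tagged distinct-value list
theorem pv_runs_eq (l : List String) (h : l.Pairwise (· ≤ ·)) :
    pvRuns l = (PySem.Set.ofList l).map (fun k => (k, (l.count k : Int))) := by
  induction l using pvRuns.induct with
  | case1 => simp [pvRuns]
  | case2 x t ih =>
      have hpc := List.pairwise_cons.mp h
      have hxt : ∀ y ∈ t, x ≤ y := hpc.1
      have ht : t.Pairwise (· ≤ ·) := hpc.2
      have hxnr : x ∉ t.dropWhile (fun y => y == x) := pv_not_mem_dropWhile x t hxt ht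
      have hrpw : (t.dropWhile (fun y => y == x)).Pairwise (· ≤ ·) :=
        ht.sublist (List.dropWhile_sublist _)
      have hw : ∀ y ∈ t.takeWhile (fun y => y == x), y = x := by
        intro y hy
        simpa using List.mem_takeWhile_imp hy
      have hsplit : t.takeWhile (fun y => y == x) ++ t.dropWhile (fun y => y == x) = t :=
        List.takeWhile_append_dropWhile
      have hkey : PySem.Set.update [x]
          (t.takeWhile (fun y => y == x) ++ t.dropWhile (fun y => y == x))
          = x :: PySem.Set.ofList (t.dropWhile (fun y => y == x)) := by
        simp only [PySem.Set.update, List.foldl_append]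
        rw [show List.foldl PySem.Set.add [x] (t.takeWhile (fun y => y == x)) = [x] from
          pv_update_const _ [x] x List.mem_cons_self hw]
        exact pv_update_cons _ [] x hxnr
      have hof : PySem.Set.ofList (x :: t)
          = x :: PySem.Set.ofList (t.dropWhile (fun y => y == x)) := by
        show PySem.Set.update (PySem.Set.add PySem.Set.empty x) t = _
        rw [show PySem.Set.add PySem.Set.empty x = [x] from rfl]
        conv_lhs => rw [← hsplit]
        exact hkey
      have hcx : ((x :: t).count x : Int) = 1 + ((t.takeWhile (fun y => y == x)).length : Int) := by
        have h1 : t.count x = (t.takeWhile (fun y => y == x)).length := by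
          conv_lhs => rw [← hsplit]
          rw [List.count_append, List.count_eq_zero.mpr hxnr,
            List.count_eq_length.mpr (fun b hb => ((hw b hb) ▸ rfl : x = b))]
          omega
        rw [List.count_cons_self, h1]
        push_cast
        ring
      have hck : ∀ k ∈ PySem.Set.ofList (t.dropWhile (fun y => y == x)),
          (t.dropWhile (fun y => y == x)).count k = (x :: t).count k := by
        intro k hk
        have hkr : k ∈ t.dropWhile (fun y => y == x) := (PySem.Set.mem_ofList _ _).mp hk
        have hkx : k ≠ x := fun hkx => hxnr (hkx ▸ hkr)
        have hknw : k ∉ t.takeWhile (fun y => y == x) := fun hkw => hkx (hw k hkw)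
        have h2 : t.count k = (t.dropWhile (fun y => y == x)).count k := by
          conv_lhs => rw [← hsplit]
          rw [List.count_append, List.count_eq_zero.mpr hknw]
          omega
        simp [h2, Ne.symm hkx]
      rw [pvRuns, hof, List.map_cons, ih hrpw]
      congr 1
      · rw [hcx]
      · exact (List.map_congr_left (fun k hk => by rw [hck k hk])).symm

-- sorted distinct values = distinct values of the sorted list
theorem pv_ofList_sorted (ms : List String) :
    PySem.Set.ofList (PySem.List.sorted ms (fun x => x) false)
      = PySem.List.sorted (PySem.Set.ofList ms) (fun x => x) false := by
  have hsub : (PySem.Set.ofList (PySem.List.sorted ms (fun x => x) false)).Sublist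
      (PySem.List.sorted ms (fun x => x) false) := by
    simpa using pv_update_sublist (PySem.List.sorted ms (fun x => x) false) []
  have hle : (PySem.Set.ofList (PySem.List.sorted ms (fun x => x) false)).Pairwise (· ≤ ·) :=
    (PySem.List.sorted_pairwise ms (fun x => x)).sublist hsub
  have hnd := PySem.Set.nodup_ofList (PySem.List.sorted ms (fun x => x) false)
  have hlt : (PySem.Set.ofList (PySem.List.sorted ms (fun x => x) false)).Pairwise (· < ·) :=
    (hle.and hnd).imp (fun hp => lt_of_le_of_ne hp.1 hp.2)
  have hperm : (PySem.Set.ofList (PySem.List.sorted ms (fun x => x) false)).Perm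
      (PySem.Set.ofList ms) := by
    refine (List.perm_ext_iff_of_nodup (PySem.Set.nodup_ofList _) (PySem.Set.nodup_ofList _)).mpr ?_
    intro a
    simp [PySem.Set.mem_ofList, PySem.List.mem_sorted]
  exact (PySem.List.sorted_eq_of_perm_of_pairwise_lt _ _ _ hperm hlt).symm

-- ===== VERDICT (by name: the statement is the Claim_ definition above) =====
theorem modalidade_total_spec : Claim_equal_modalidade_total := by
  intro dados _ _
  unfold Spec_modalidade_total modalidade_total modalidade_total_alt
  show PySem.List.sorted2 (dados.foldl pvStepA PySem.Dict.empty).items Prod.fst Prod.snd = _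
  rw [pv_foldl_mods, PySem.Dict.foldl_insert_getD_add_one_eq_counter,
    PySem.Dict.items_counter, pv_sorted2_map,
    pv_runs_eq _ (PySem.List.sorted_pairwise (pvMods dados) (fun x => x)),
    pv_ofList_sorted]
  exact List.map_congr_left (fun k _ => by
    rw [List.Perm.count_eq (PySem.List.sorted_perm (pvMods dados) (fun x => x) false) k])
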